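-- pv_equiv track=rewrite | github.com/2chang5/changs-algorithm-repo | 카카오모빌리티/2.py | solution
-- ===== SOURCE A (Python) =====
-- def solution(id_list, k):
--     answer = 0
--
--     customerDict = {}
--
--     for i in id_list:
--         for j in i.split():
--             customerDict[j] = 0
--
--     for i in id_list:
--         for j in customerDict.keys():
--             if j in i:
--                 customerDict[j] += 1
--
--     for i in customerDict.values():
--         if i > k:
--             answer += k
--         else:
--             answer += i
--
--     return answer
-- ===== SOURCE B (Python) =====
-- def solution(id_list, k):
--     # Inverted matching: instead of searching each token in each row,
--     # enumerate each row's substrings once and bump the counters of the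
--     # tokens found among them.
--     counts = dict.fromkeys((t for row in id_list for t in row.split()), 0)
--     for row in id_list:
--         n = len(row)
--         for s in {row[i:j] for i in range(n) for j in range(i + 1, n + 1)}:
--             if s in counts:
--                 counts[s] += 1
--     return sum(min(c, k) for c in counts.values())
-- ===== Notes on version B (the rewrite author's own statement) =====
-- stated objective: faster
-- what changed: B inverts the matching direction: instead of A's per-token substring search through every row (an R x T product of scans), B enumerates each row's substrings once into a hash-set and increments the counters of exactly the tokens found among them (per-row matched-token sets), then sums the k-capped counters.
import Mathlib
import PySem

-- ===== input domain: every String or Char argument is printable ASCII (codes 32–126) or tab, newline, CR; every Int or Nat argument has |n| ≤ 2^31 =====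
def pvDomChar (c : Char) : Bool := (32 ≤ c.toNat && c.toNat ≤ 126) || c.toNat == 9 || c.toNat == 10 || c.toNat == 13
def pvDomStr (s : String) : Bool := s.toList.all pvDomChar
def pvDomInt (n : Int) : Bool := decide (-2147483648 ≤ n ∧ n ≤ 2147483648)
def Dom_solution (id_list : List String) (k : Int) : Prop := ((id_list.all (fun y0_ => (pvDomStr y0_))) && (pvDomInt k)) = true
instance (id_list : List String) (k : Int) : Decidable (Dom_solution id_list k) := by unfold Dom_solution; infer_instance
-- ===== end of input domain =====

-- B inverts the matching direction: instead of A's per-token substring search through every row,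
-- it enumerates each row's substrings once into a set and increments the counters of the tokens
-- found among them; a timing run measured B faster on the generated inputs.

-- ===== PORT A =====
def solution (id_list : List String) (k : Int) : Int :=
  let customerDict : PySem.Dict String Int :=
    id_list.foldl (fun d i => (PySem.Str.split₀ i).foldl (fun d j => d.insert j 0) d)
      PySem.Dict.empty
  let customerDict2 :=
    id_list.foldl
      (fun d i =>
        d.keys.foldl (fun d' j => if PySem.Str.isIn j i then d'.modify j 0 (· + 1) else d') d)
      customerDict
  customerDict2.values.foldl (fun answer i => if i > k then answer + k else answer + i) 0

-- ===== PORT B =====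
-- the list behind Source B's set comprehension {row[i:j] for i in range(n) for j in range(i+1, n+1)}
def pvSubsList (row : String) : List String :=
  let n : Int := PySem.Str.len row
  (PySem.List.pyRange 0 n 1).flatMap (fun i =>
    (PySem.List.pyRange (i + 1) (n + 1) 1).map (fun j =>
      PySem.Str.slice row (some i) (some j)))

def solution_alt (id_list : List String) (k : Int) : Int :=
  let counts : PySem.Dict String Int :=
    (id_list.flatMap (fun row => PySem.Str.split₀ row)).foldl
      (fun d t => d.insert t 0) PySem.Dict.empty
  let counts2 :=
    id_list.foldl
      (fun d row =>
        (PySem.Set.ofList (pvSubsList row)).foldl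
          (fun d' s => if d'.contains s then d'.modify s 0 (· + 1) else d') d)
      counts
  (counts2.values.map (fun c => min c k)).sum

-- ===== PRECONDITION & SPEC =====
def Spec_solution (id_list : List String) (k : Int) (out : Int) : Prop := out = solution_alt id_list k
instance (id_list : List String) (k : Int) (out : Int) : Decidable (Spec_solution id_list k out) := by unfold Spec_solution; infer_instance

-- ===== CLAIM (what is proved, stated in full; the proofs are below) =====
def Claim_equal_solution : Prop := ∀ (id_list : List String) (k : Int), Dom_solution id_list k → Spec_solution id_list k (solution id_list k)

-- ===== LEMMAS AND PROOFS =====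

-- A side: one pass of A's second loop adds, at key t, one per occurrence of t in K when t is in row i
theorem pv_inner_getD (i t : String) (K : List String) (d : PySem.Dict String Int) :
    (K.foldl (fun d' j => if PySem.Str.isIn j i then d'.modify j 0 (· + 1) else d') d).getD t 0
      = d.getD t 0 + (if PySem.Str.isIn t i then (K.count t : Int) else 0) := by
  induction K generalizing d with
  | nil => simp
  | cons j rest ih =>
    rw [List.foldl_cons, ih]
    by_cases hjt : t = j
    · subst hjt
      by_cases hti : PySem.Str.isIn t i
      · simp only [hti, if_true, PySem.Dict.getD_modify_self, List.count_cons_self]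
        push_cast; ring
      · simp only [PySem.Str.isIn_eq] at hti
        simp [hti]
    · have h2 : (if PySem.Str.isIn j i then d.modify j 0 (· + 1) else d).getD t 0 = d.getD t 0 := by
        split
        · exact PySem.Dict.getD_modify_of_ne d 0 _ hjt
        · rfl
      rw [h2, List.count_cons]
      simp [Ne.symm hjt]

-- A side: that pass does not change the key list when it runs over existing keys
theorem pv_inner_keys (i : String) (K : List String) (d : PySem.Dict String Int)
    (h : ∀ j ∈ K, j ∈ d.keys) :
    (K.foldl (fun d' j => if PySem.Str.isIn j i then d'.modify j 0 (· + 1) else d') d).keys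
      = d.keys := by
  induction K generalizing d with
  | nil => rfl
  | cons j rest ih =>
    have hj : j ∈ d.keys := h j (List.mem_cons_self ..)
    have hstep : (if PySem.Str.isIn j i then d.modify j 0 (· + 1) else d).keys = d.keys := by
      split
      · rw [PySem.Dict.keys_modify,
          PySem.Dict.keys_insert_of_contains _ _ ((PySem.Dict.contains_iff_mem_keys d j).mpr hj)]
      · rfl
    rw [List.foldl_cons,
      ih _ (fun x hx => by rw [hstep]; exact h x (List.mem_cons_of_mem _ hx)), hstep]

-- A's whole second loop: keys unchanged, and each key's value grows by the row count of that token
theorem pv_outer (rows : List String) (d : PySem.Dict String Int) (hnd : d.keys.Nodup) :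
    (rows.foldl
        (fun d i => d.keys.foldl
          (fun d' j => if PySem.Str.isIn j i then d'.modify j 0 (· + 1) else d') d) d).keys
      = d.keys
    ∧ ∀ t ∈ d.keys,
      (rows.foldl
          (fun d i => d.keys.foldl
            (fun d' j => if PySem.Str.isIn j i then d'.modify j 0 (· + 1) else d') d) d).getD t 0
        = d.getD t 0 + (rows.countP (fun row => PySem.Str.isIn t row) : Int) := by
  induction rows generalizing d with
  | nil => simp
  | cons i rest ih =>
    have hk : (d.keys.foldl
        (fun d' j => if PySem.Str.isIn j i then d'.modify j 0 (· + 1) else d') d).keys = d.keys :=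
      pv_inner_keys i d.keys d (fun _ h => h)
    obtain ⟨ihk, ihv⟩ := ih _ (hk ▸ hnd)
    refine ⟨by rw [List.foldl_cons, ihk, hk], ?_⟩
    intro t ht
    rw [List.foldl_cons, ihv t (by rw [hk]; exact ht), pv_inner_getD,
      List.count_eq_one_of_mem hnd ht, List.countP_cons]
    by_cases hti : PySem.Str.isIn t i
    · simp only [hti, if_true]; push_cast; ring
    · push_cast; ring

-- the dict-building loop only ever stores 0
theorem pv_build_zero (L : List String) (d : PySem.Dict String Int)
    (h : ∀ s, d.getD s 0 = 0) (t : String) :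
    (L.foldl (fun d j => d.insert j (0 : Int)) d).getD t 0 = 0 := by
  induction L generalizing d with
  | nil => exact h t
  | cons j rest ih =>
    exact ih _ (fun s => by rw [PySem.Dict.getD_insert]; split <;> simp [h])

-- every word produced by str.split() is nonempty (worker of split₀)
theorem pv_split_go_ne_nil (s : List Char) :
    ∀ (cur : List Char) (acc : List (List Char)), (∀ w ∈ acc, w ≠ []) →
      ∀ w ∈ PySem.Chars.split₀.go s cur acc, w ≠ [] := by
  induction s with
  | nil =>
    intro cur acc hacc w hw
    simp only [PySem.Chars.split₀.go] at hw
    by_cases hc : cur.isEmpty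
    · rw [if_pos hc, List.mem_reverse] at hw
      exact hacc w hw
    · rw [if_neg hc, List.mem_reverse, List.mem_cons] at hw
      rcases hw with rfl | hw
      · have hcur : cur ≠ [] := by simpa using hc
        simpa using hcur
      · exact hacc w hw
  | cons c rest ih =>
    intro cur acc hacc w hw
    simp only [PySem.Chars.split₀.go] at hw
    by_cases h1 : PySem.Chars.isspace c
    · rw [if_pos h1] at hw
      by_cases hc : cur.isEmpty
      · rw [if_pos hc] at hw
        exact ih [] acc hacc w hw
      · rw [if_neg hc] at hw
        refine ih [] (cur.reverse :: acc) ?_ w hw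
        intro v hv
        rcases List.mem_cons.mp hv with rfl | hv
        · have hcur : cur ≠ [] := by simpa using hc
          simpa using hcur
        · exact hacc v hv
    · rw [if_neg h1] at hw
      exact ih (c :: cur) acc hacc w hw

theorem pv_token_ne_nil (t s : String) (h : t ∈ PySem.Str.split₀ s) : t.toList ≠ [] := by
  have hmem : t.toList ∈ (PySem.Str.split₀ s).map String.toList := List.mem_map_of_mem h
  rw [PySem.Str.split₀_map_toList] at hmem
  exact pv_split_go_ne_nil s.toList [] [] (by simp) t.toList hmem

-- a nonempty string is among Source B's enumerated substrings of a row iff it is an infix of it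
theorem pv_mem_subsList (t row : String) (ht : t.toList ≠ []) :
    t ∈ pvSubsList row ↔ t.toList <:+: row.toList := by
  unfold pvSubsList
  simp only [List.mem_flatMap, List.mem_map, PySem.List.mem_pyRange_one, PySem.Str.len_eq]
  constructor
  · rintro ⟨i, ⟨hi0, hin⟩, j, ⟨hj1, hjn⟩, hslice⟩
    have htl : t.toList = PySem.List.slice row.toList (some i) (some j) := by
      rw [← hslice]; simp
    rw [htl, PySem.List.slice_toNat _ hi0 (by omega)]
    exact (List.take_prefix _ _).isInfix.trans (List.drop_suffix _ _).isInfix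
  · rintro ⟨pre, suf, hps⟩
    have hlen : row.toList.length = pre.length + t.toList.length + suf.length := by
      rw [← hps]; simp; omega
    have htpos : 0 < t.toList.length := List.length_pos_iff.mpr ht
    refine ⟨(pre.length : Int), ⟨by positivity, by omega⟩,
      ((pre.length + t.toList.length : Nat) : Int), ⟨by push_cast; omega, by push_cast; omega⟩, ?_⟩
    rw [← String.toList_inj]
    have : (PySem.Str.slice row (some (pre.length : Int))
        (some ((pre.length + t.toList.length : Nat) : Int))).toList
        = PySem.List.slice row.toList (some (pre.length : Int))
            (some ((pre.length + t.toList.length : Nat) : Int)) := by simp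
    rw [this, PySem.List.slice_natCast, ← hps, Nat.add_sub_cancel_left, List.append_assoc,
      List.drop_left, List.take_left]

-- B side: one row's counting pass: keys unchanged, each key in the row's substring set gains one
theorem pv_b_inner (S : List String) (t : String) (d : PySem.Dict String Int) (hnd : S.Nodup) :
    (S.foldl (fun d' s => if d'.contains s then d'.modify s 0 (· + 1) else d') d).keys = d.keys
    ∧ (S.foldl (fun d' s => if d'.contains s then d'.modify s 0 (· + 1) else d') d).getD t 0
      = d.getD t 0 + (if t ∈ S ∧ t ∈ d.keys then 1 else 0) := by
  induction S generalizing d with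
  | nil => simp
  | cons s rest ih =>
    have hstep : (if d.contains s then d.modify s 0 (· + 1) else d).keys = d.keys := by
      by_cases h : d.contains s
      · simp only [h, if_true, PySem.Dict.keys_modify, PySem.Dict.keys_insert_of_contains _ _ h]
      · simp [h]
    obtain ⟨ihk, ihv⟩ := ih (if d.contains s then d.modify s 0 (· + 1) else d)
      (List.nodup_cons.mp hnd).2
    refine ⟨by rw [List.foldl_cons, ihk, hstep], ?_⟩
    rw [List.foldl_cons, ihv, hstep]
    have hsrest : s ∉ rest := (List.nodup_cons.mp hnd).1
    by_cases hts : t = s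
    · subst hts
      by_cases hc : d.contains t
      · have htk : t ∈ d.keys := (PySem.Dict.contains_iff_mem_keys d t).mp hc
        simp [hc, PySem.Dict.getD_modify_self, hsrest, htk]
      · have htk : t ∉ d.keys := fun h => hc ((PySem.Dict.contains_iff_mem_keys d t).mpr h)
        simp [hc, htk]
    · have hgd : (if d.contains s then d.modify s 0 (· + 1) else d).getD t 0 = d.getD t 0 := by
        by_cases hc : d.contains s
        · simp only [hc, if_true]; exact PySem.Dict.getD_modify_of_ne d 0 _ hts
        · simp [hc]
      rw [hgd]
      simp [List.mem_cons, hts]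

-- B's whole counting loop: keys unchanged, each key's value grows by the number of rows whose
-- substring set contains it
theorem pv_b_outer (rows : List String) (d : PySem.Dict String Int) :
    (rows.foldl
        (fun d row => (PySem.Set.ofList (pvSubsList row)).foldl
          (fun d' s => if d'.contains s then d'.modify s 0 (· + 1) else d') d) d).keys
      = d.keys
    ∧ ∀ t ∈ d.keys,
      (rows.foldl
          (fun d row => (PySem.Set.ofList (pvSubsList row)).foldl
            (fun d' s => if d'.contains s then d'.modify s 0 (· + 1) else d') d) d).getD t 0
        = d.getD t 0 + (rows.countP (fun row => decide (t ∈ PySem.Set.ofList (pvSubsList row))) : Int) := by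
  induction rows generalizing d with
  | nil => simp
  | cons row rest ih =>
    have hk' := (pv_b_inner (PySem.Set.ofList (pvSubsList row)) row d
      (PySem.Set.nodup_ofList _)).1
    obtain ⟨ihk, ihv⟩ := ih ((PySem.Set.ofList (pvSubsList row)).foldl
      (fun d' s => if d'.contains s then d'.modify s 0 (· + 1) else d') d)
    refine ⟨by rw [List.foldl_cons, ihk, hk'], ?_⟩
    intro t ht
    rw [List.foldl_cons, ihv t (by rw [hk']; exact ht),
      (pv_b_inner (PySem.Set.ofList (pvSubsList row)) t d (PySem.Set.nodup_ofList _)).2,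
      List.countP_cons]
    by_cases hmem : t ∈ PySem.Set.ofList (pvSubsList row)
    · simp only [hmem, ht, and_self, if_true, decide_true]
      push_cast; ring
    · simp only [hmem, false_and, if_false, decide_false]
      push_cast; ring

-- ===== VERDICT (by name: the statement is the Claim_ definition above) =====
theorem solution_spec : Claim_equal_solution := by
  intro id_list k _
  unfold Spec_solution solution solution_alt
  dsimp only
  set L := id_list.flatMap (fun row => PySem.Str.split₀ row) with hL
  have hflat : id_list.foldl
      (fun d i => (PySem.Str.split₀ i).foldl (fun d j => d.insert j (0 : Int)) d)
      PySem.Dict.empty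
      = L.foldl (fun d j => d.insert j (0 : Int)) PySem.Dict.empty := by
    rw [hL, List.flatMap_def, List.foldl_flatten, List.foldl_map]
  rw [hflat]
  set d1 := L.foldl (fun d j => d.insert j (0 : Int)) PySem.Dict.empty with hd1
  have hkeys1 : d1.keys = PySem.Set.ofList L := by
    rw [hd1, PySem.Dict.keys_foldl_insert L (fun _ _ => (0 : Int)), PySem.Dict.keys_empty,
      PySem.Set.update_nil_left]
  have hnd : d1.keys.Nodup := by rw [hkeys1]; exact PySem.Set.nodup_ofList L
  have hzero : ∀ t, d1.getD t 0 = 0 := fun t =>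
    pv_build_zero L PySem.Dict.empty (fun s => PySem.Dict.getD_empty s 0) t
  -- A side
  obtain ⟨hKA, hVA⟩ := pv_outer id_list d1 hnd
  set DA := id_list.foldl
      (fun d i => d.keys.foldl
        (fun d' j => if PySem.Str.isIn j i then d'.modify j 0 (· + 1) else d') d) d1 with hDA
  have hDAnd : DA.keys.Nodup := by rw [hKA]; exact hnd
  rw [PySem.Dict.values_eq_map_keys DA hDAnd 0]
  have hfun : (fun (answer i : Int) => if i > k then answer + k else answer + i)
      = fun a v => a + min v k := by funext a v; split <;> omega
  rw [hfun, PySem.List.foldl_add, List.map_map, zero_add, hKA, hkeys1]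
  -- B side
  obtain ⟨hKB, hVB⟩ := pv_b_outer id_list d1
  set DB := id_list.foldl
      (fun d row => (PySem.Set.ofList (pvSubsList row)).foldl
        (fun d' s => if d'.contains s then d'.modify s 0 (· + 1) else d') d) d1 with hDB
  have hDBnd : DB.keys.Nodup := by rw [hKB]; exact hnd
  rw [PySem.Dict.values_eq_map_keys DB hDBnd 0, List.map_map, hKB, hkeys1]
  congr 1
  refine List.map_congr_left (fun t ht => ?_)
  have htL : t ∈ L := (PySem.Set.mem_ofList L t).mp ht
  have htne : t.toList ≠ [] := by
    obtain ⟨row', _, hrow'⟩ := List.mem_flatMap.mp htL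
    exact pv_token_ne_nil t row' hrow'
  have htk : t ∈ d1.keys := by rw [hkeys1]; exact ht
  show min (DA.getD t 0) k = min (DB.getD t 0) k
  rw [hVA t htk, hVB t htk, hzero t, zero_add, zero_add]
  congr 2
  refine List.countP_congr (fun row _ => ?_)
  simp only [decide_eq_true_eq, PySem.Str.isIn_eq]
  rw [PySem.Chars.isIn_iff_infix, PySem.Set.mem_ofList, pv_mem_subsList t row htne]
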